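-- pv_equiv track=rewrite | github.com/nvidia-cosmos/cosmos-curate | cosmos_curate/pipelines/video/clipping/transnetv2_extraction_stages.py | _create_spans
-- ===== SOURCE A (Python) =====
-- def _create_spans(start: int, end: int, max_length: int, min_length: int | None) -> list[list[int]]:
--     """Create spans between a start and an end point.
--
--     Args:
--         start: start point.
--         end: end point.
--         max_length: maximum length of span.
--         min_length: minimum length of span.
--
--     Returns:
--         list of spans.
--
--     """
--     spans = []
--     current_start = start
--
--     while current_start < end:
--         current_end = min(current_start + max_length, end)
--         span_length = current_end - current_start
--
--         # Check if the span meets the minimum length requirement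
--         if min_length and span_length < min_length and current_end == end:
--             break  # Drop the span if it's the last and below min_length
--
--         spans.append([current_start, current_end])
--         current_start = current_end  # Move to the next span start
--
--     return spans
-- ===== SOURCE B (Python) =====
-- def _create_spans(start: int, end: int, max_length: int, min_length: int | None) -> list[list[int]]:
--     total = end - start
--     if total <= 0:
--         return []
--     k = -((-total) // max_length)  # ceil(total / max_length) = number of spans
--     spans = [[start + i * max_length, min(start + (i + 1) * max_length, end)] for i in range(k)]
--     last_len = total - (k - 1) * max_length
--     if min_length and last_len < min_length:
--         spans.pop()  # drop the final (short) span
--     return spans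
-- ===== Notes on version B (the rewrite author's own statement) =====
-- stated objective: alternative
-- what changed: Replaces the stateful while-loop that walks current_start span by span with a closed-form computation: the span count k = ceil(total/max_length) is computed by arithmetic, the spans are produced by a single range comprehension, and the drop rule is applied once to the last span only; Pre_ excludes start < end with max_length <= 0, where A loops forever (it never returns a value there).
import Mathlib
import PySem

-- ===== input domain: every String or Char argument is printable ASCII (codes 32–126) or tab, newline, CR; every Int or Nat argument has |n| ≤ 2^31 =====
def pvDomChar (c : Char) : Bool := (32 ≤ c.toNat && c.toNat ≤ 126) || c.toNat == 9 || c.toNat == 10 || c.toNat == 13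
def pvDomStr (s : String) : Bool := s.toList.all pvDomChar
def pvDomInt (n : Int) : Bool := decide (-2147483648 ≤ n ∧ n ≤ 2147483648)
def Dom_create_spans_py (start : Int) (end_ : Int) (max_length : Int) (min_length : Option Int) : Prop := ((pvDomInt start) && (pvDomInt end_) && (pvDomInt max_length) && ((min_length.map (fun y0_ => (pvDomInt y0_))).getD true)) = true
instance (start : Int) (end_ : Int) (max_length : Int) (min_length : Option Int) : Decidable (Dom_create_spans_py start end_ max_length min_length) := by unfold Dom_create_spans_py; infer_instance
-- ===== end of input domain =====

-- B replaces A's stateful span-by-span while-loop with a closed-form span count and one range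
-- comprehension; objective: alternative (same cost, different decomposition).
-- Pre_ excludes start < end with max_length <= 0, where the Python A loops forever (returns nothing).

-- ===== PORT A =====
-- Python truthiness test 'min_length and span_length < min_length' (shared by A's and B's source)
def minDropCond (min_length : Option Int) (span_length : Int) : Bool :=
  match min_length with
  | some m => decide (m ≠ 0) && decide (span_length < m)
  | none => false

-- the while-loop of A; fuel bounds the iteration count (each step advances current_start by >= 1
-- whenever max_length > 0, so (end-start).toNat fuel is enough on all inputs where A terminates)
def createSpansLoopA (end_ max_length : Int) (min_length : Option Int) :
    Nat → Int → List (List Int) → List (List Int)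
  | 0, _, spans => spans
  | fuel + 1, current_start, spans =>
    if current_start < end_ then
      let current_end := min (current_start + max_length) end_
      let span_length := current_end - current_start
      if minDropCond min_length span_length && decide (current_end = end_) then
        spans
      else
        createSpansLoopA end_ max_length min_length fuel current_end (spans ++ [[current_start, current_end]])
    else spans

def create_spans_py (start : Int) (end_ : Int) (max_length : Int) (min_length : Option Int) : List (List Int) :=
  createSpansLoopA end_ max_length min_length (end_ - start).toNat start []

-- ===== PORT B =====
def create_spans_py_alt (start : Int) (end_ : Int) (max_length : Int) (min_length : Option Int) : List (List Int) :=
  let total := end_ - start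
  if total ≤ 0 then []
  else
    let k := -(PySem.Int.floordiv (-total) max_length)
    let spans := (PySem.List.pyRange 0 k 1).map
      (fun i => [start + i * max_length, min (start + (i + 1) * max_length) end_])
    let last_len := total - (k - 1) * max_length
    if minDropCond min_length last_len then spans.dropLast else spans

-- ===== PRECONDITION & SPEC =====
-- exactly the inputs on which the Python A terminates: if start < end then max_length must be positive
def Pre_create_spans_py (start : Int) (end_ : Int) (max_length : Int) (min_length : Option Int) : Prop :=
  end_ ≤ start ∨ 0 < max_length
instance (start : Int) (end_ : Int) (max_length : Int) (min_length : Option Int) : Decidable (Pre_create_spans_py start end_ max_length min_length) := by unfold Pre_create_spans_py; infer_instance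
def pvWitness_create_spans_py : Int × Int × Int × Option Int := (0, 10, 3, some 2)
def Spec_create_spans_py (start : Int) (end_ : Int) (max_length : Int) (min_length : Option Int) (out : List (List Int)) : Prop := out = create_spans_py_alt start end_ max_length min_length
instance (start : Int) (end_ : Int) (max_length : Int) (min_length : Option Int) (out : List (List Int)) : Decidable (Spec_create_spans_py start end_ max_length min_length out) := by unfold Spec_create_spans_py; infer_instance

-- ===== CLAIM (what is proved, stated in full; the proofs are below) =====
def Claim_equal_create_spans_py : Prop := ∀ (start : Int) (end_ : Int) (max_length : Int) (min_length : Option Int), Dom_create_spans_py start end_ max_length min_length → Pre_create_spans_py start end_ max_length min_length → Spec_create_spans_py start end_ max_length min_length (create_spans_py start end_ max_length min_length)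

-- ===== LEMMAS AND PROOFS =====

-- one step of B's closed form: with at least one full span remaining, B restarted at cs is
-- the first full span consed onto B restarted at cs + ml
lemma alt_step (end_ ml : Int) (mlO : Option Int) (cs : Int) (hml : 0 < ml) (h : cs + ml < end_) :
    create_spans_py_alt cs end_ ml mlO
      = [cs, cs + ml] :: create_spans_py_alt (cs + ml) end_ ml mlO := by
  have htot : ¬ end_ - cs ≤ 0 := by omega
  have htot' : ¬ end_ - (cs + ml) ≤ 0 := by omega
  unfold create_spans_py_alt
  simp only [htot, htot', if_false]
  set q := -(PySem.Int.floordiv (-(end_ - (cs + ml))) ml) with hq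
  have hb := (PySem.Int.neg_floordiv_neg_eq_iff_of_pos hml).mp hq.symm
  have hq1 : 1 ≤ q := by nlinarith [hb.1, hb.2]
  have hk : -(PySem.Int.floordiv (-(end_ - cs)) ml) = q + 1 := by
    rw [PySem.Int.neg_floordiv_neg_eq_iff_of_pos hml]
    constructor <;> nlinarith [hb.1, hb.2]
  rw [hk]
  have hrange : ∀ (f : Int → List Int),
      (PySem.List.pyRange 0 (q + 1) 1).map f
        = f 0 :: (PySem.List.pyRange 0 q 1).map (fun i => f (i + 1)) := by
    intro f
    rw [PySem.List.pyRange_one_cons (by omega), List.map_cons]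
    congr 1
    rw [PySem.List.pyRange_one, PySem.List.pyRange_one, List.map_map, List.map_map]
    have he : (q + 1 - (0 + 1)).toNat = (q - 0).toNat := by omega
    rw [he]
    apply List.map_congr_left
    intro k _
    simp only [Function.comp_apply]
    congr 1
    omega
  rw [hrange]
  have hhead : [cs + 0 * ml, min (cs + (0 + 1) * ml) end_] = [cs, cs + ml] := by
    norm_num [min_eq_left (le_of_lt h)]
  rw [hhead]
  have hmap : ((PySem.List.pyRange 0 q 1).map
        (fun i => [cs + (i + 1) * ml, min (cs + (i + 1 + 1) * ml) end_]))
      = (PySem.List.pyRange 0 q 1).map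
        (fun i => [cs + ml + i * ml, min (cs + ml + (i + 1) * ml) end_]) := by
    apply List.map_congr_left
    intro i _
    have e1 : cs + (i + 1) * ml = cs + ml + i * ml := by ring
    have e2 : cs + (i + 1 + 1) * ml = cs + ml + (i + 1) * ml := by ring
    rw [e1, e2]
  rw [hmap]
  have hlen : end_ - cs - (q + 1 - 1) * ml = end_ - (cs + ml) - (q - 1) * ml := by ring
  rw [hlen]
  have hne : ((PySem.List.pyRange 0 q 1).map
      (fun i => [cs + ml + i * ml, min (cs + ml + (i + 1) * ml) end_])) ≠ [] := by
    simp [PySem.List.pyRange_one]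
    omega
  cases hbb : minDropCond mlO (end_ - (cs + ml) - (q - 1) * ml)
  · simp
  · simp [List.dropLast_cons_of_ne_nil hne]

-- the loop from any current_start cs, with enough fuel, yields the accumulator followed by
-- B's closed-form result restarted at cs
lemma loopA_eq_alt (end_ ml : Int) (mlO : Option Int) (hml : 0 < ml) :
    ∀ (n : Nat) (fuel : Nat) (cs : Int) (spans : List (List Int)),
      (end_ - cs).toNat = n → n ≤ fuel →
      createSpansLoopA end_ ml mlO fuel cs spans = spans ++ create_spans_py_alt cs end_ ml mlO := by
  intro n
  induction n using Nat.strong_induction_on with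
  | _ n IH =>
    intro fuel cs spans hn hfuel
    by_cases hcs : cs < end_
    · have hn0 : 0 < n := by omega
      obtain ⟨f, rfl⟩ : ∃ f, fuel = f + 1 := ⟨fuel - 1, by omega⟩
      rw [createSpansLoopA]
      simp only [hcs, if_true]
      by_cases hlast : end_ ≤ cs + ml
      · -- final (possibly short) span: exactly one span remains
        have hce : min (cs + ml) end_ = end_ := min_eq_right hlast
        rw [hce]
        have hk : -(PySem.Int.floordiv (-(end_ - cs)) ml) = 1 := by
          rw [PySem.Int.neg_floordiv_neg_eq_iff_of_pos hml]
          constructor <;> nlinarith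
        have halt : create_spans_py_alt cs end_ ml mlO
            = if minDropCond mlO (end_ - cs) then [] else [[cs, end_]] := by
          unfold create_spans_py_alt
          simp only [show ¬ end_ - cs ≤ 0 by omega, if_false, hk]
          have hr : PySem.List.pyRange 0 1 1 = [0] := by
            rw [PySem.List.pyRange_one]; rfl
          rw [hr]
          norm_num [min_eq_right hlast]
        rw [halt]
        cases hb : minDropCond mlO (end_ - cs)
        · simp only [Bool.false_and, Bool.false_eq_true, if_false]
          rw [IH 0 hn0 f end_ (spans ++ [[cs, end_]]) (by omega) (by omega)]
          have hnil : create_spans_py_alt end_ end_ ml mlO = [] := by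
            unfold create_spans_py_alt; simp
          rw [hnil]
          simp
        · simp
      · -- more than one full span remains: peel the first full span and recurse
        have hce : min (cs + ml) end_ = cs + ml := min_eq_left (by omega)
        rw [hce]
        rw [if_neg (by simp [show cs + ml ≠ end_ by omega])]
        have hn' : (end_ - (cs + ml)).toNat < n := by omega
        rw [IH _ hn' f (cs + ml) (spans ++ [[cs, cs + ml]]) rfl (by omega)]
        rw [alt_step end_ ml mlO cs hml (by omega)]
        simp
    · -- loop guard false: no span remains
      have halt : create_spans_py_alt cs end_ ml mlO = [] := by
        unfold create_spans_py_alt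
        simp [show end_ - cs ≤ 0 by omega]
      cases fuel <;> simp [createSpansLoopA, hcs, halt]

-- ===== VERDICT (by name: the statement is the Claim_ definition above) =====
theorem create_spans_py_spec : Claim_equal_create_spans_py := by
  intro start end_ ml mlO _ hpre
  unfold Spec_create_spans_py create_spans_py
  rcases hpre with h | h
  · have h0 : (end_ - start).toNat = 0 := by omega
    rw [h0]
    unfold createSpansLoopA create_spans_py_alt
    simp [show end_ - start ≤ 0 by omega]
  · exact loopA_eq_alt end_ ml mlO h _ _ start [] rfl le_rfl
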